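-- pv_equiv track=rewrite | github.com/Floreuzan/Scrabble-simulation | create_hand.py | update_hand
-- ===== SOURCE A (Python) =====
-- def get_frequency_dict(sequence):
--     """
--     Returns a dictionary where the keys are elements of the sequence
--     and the values are integer counts, for the number of times that
--     an element is repeated in the sequence.
--
--     sequence: string or list
--     return: dictionary
--     """
--
--     # freqs: dictionary (element_type -> int)
--     freq = {}
--     for x in sequence:
--         freq[x] = freq.get(x, 0) + 1
--     return freq
--
-- def update_hand(hand, word):
--     """
--     Does NOT assume that hand contains every letter in word at least as
--     many times as the letter appears in word. Letters in word that don't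
--     appear in hand should be ignored. Letters that appear in word more times
--     than in hand should never result in a negative count; instead, set the
--     count in the returned hand to 0 (or remove the letter from the
--     dictionary, depending on how your code is structured).
--
--     Updates the hand: uses up the letters in the given word
--     and returns the new hand, without those letters in it.
--
--     Has no side effects: does not modify hand.
--
--     word: string
--     hand: dictionary (string -> int)
--     returns: dictionary (string -> int)
--     """
--
--     word = word.lower()
--     # display_hand(hand)                  #print the hand
--     freq_word = get_frequency_dict(word)  # We convert word in dict type with the freq of each letters
--
--     new_hand = hand.copy()  # we do not want to mute hand
--
--     for j in freq_word.keys():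
--         if j in new_hand:
--             new_hand[j] -= freq_word.get(j.lower(), 0)
--
--     return new_hand
-- ===== SOURCE B (Python) =====
-- def update_hand(hand, word):
--     new_hand = hand.copy()
--     for c in word.lower():
--         if c in new_hand:
--             new_hand[c] -= 1
--     return new_hand
-- ===== Notes on version B (the rewrite author's own statement) =====
-- stated objective: simpler
-- what changed: B drops A's intermediate frequency dictionary and its two-phase count-then-subtract loop, instead copying the hand once and decrementing the entry once per character of the lowered word in a single pass.
import Mathlib
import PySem

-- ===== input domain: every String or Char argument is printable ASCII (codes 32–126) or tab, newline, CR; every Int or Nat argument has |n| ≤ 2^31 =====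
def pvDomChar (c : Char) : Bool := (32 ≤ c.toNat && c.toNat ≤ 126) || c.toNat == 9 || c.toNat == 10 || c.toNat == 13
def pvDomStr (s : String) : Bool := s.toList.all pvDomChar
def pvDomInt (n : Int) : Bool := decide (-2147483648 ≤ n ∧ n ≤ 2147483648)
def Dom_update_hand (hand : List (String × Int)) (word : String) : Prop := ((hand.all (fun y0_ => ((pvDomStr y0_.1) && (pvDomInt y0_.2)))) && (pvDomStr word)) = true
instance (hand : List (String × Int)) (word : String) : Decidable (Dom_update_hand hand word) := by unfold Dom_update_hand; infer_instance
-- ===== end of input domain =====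

-- B replaces A's two-phase frequency-dictionary-then-subtract with a single pass that
-- decrements once per character of the lowered word (simpler; same exact values, no clamping).

-- ===== PORT A =====
def get_frequency_dict (sequence : List String) : PySem.Dict String Int :=
  sequence.foldl (fun freq x => freq.insert x (freq.getD x 0 + 1)) PySem.Dict.empty

def update_hand (hand : List (String × Int)) (word : String) : List (String × Int) :=
  let w := PySem.Str.lower word
  let freq_word := get_frequency_dict (w.toList.map (fun c => String.ofList [c]))
  let new_hand := PySem.Dict.ofList hand
  (freq_word.keys.foldl
    (fun nh j =>
      if nh.contains j then nh.insert j (nh.getD j 0 - freq_word.getD (PySem.Str.lower j) 0)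
      else nh)
    new_hand).items

-- ===== PORT B =====
def update_hand_alt (hand : List (String × Int)) (word : String) : List (String × Int) :=
  ((PySem.Str.lower word).toList.foldl
    (fun nh c =>
      let s := String.ofList [c]
      if nh.contains s then nh.insert s (nh.getD s 0 - 1) else nh)
    (PySem.Dict.ofList hand)).items

-- ===== PRECONDITION & SPEC =====
def Spec_update_hand (hand : List (String × Int)) (word : String) (out : List (String × Int)) : Prop := out = update_hand_alt hand word
instance (hand : List (String × Int)) (word : String) (out : List (String × Int)) : Decidable (Spec_update_hand hand word out) := by unfold Spec_update_hand; infer_instance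

-- ===== CLAIM (what is proved, stated in full; the proofs are below) =====
def Claim_equal_update_hand : Prop := ∀ (hand : List (String × Int)) (word : String), Dom_update_hand hand word → Spec_update_hand hand word (update_hand hand word)

-- ===== LEMMAS AND PROOFS =====

theorem toNat_ofNat_valid (n : Nat) (hv : n.isValidChar) : (Char.ofNat n).toNat = n := by
  unfold Char.ofNat
  rw [dif_pos hv]
  unfold Char.ofNatAux Char.toNat
  simp

theorem lowerChar_idem (c : Char) :
    PySem.Chars.lowerChar (PySem.Chars.lowerChar c) = PySem.Chars.lowerChar c := by
  unfold PySem.Chars.lowerChar PySem.Chars.isupper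
  split_ifs with h1 h2 <;> try rfl
  exfalso
  simp only [Bool.and_eq_true, decide_eq_true_eq, Char.le_def, UInt32.le_iff_toNat_le] at h1 h2
  obtain ⟨ha, hb⟩ := h1
  have ha' : 65 ≤ c.toNat := ha
  have hb' : c.toNat ≤ 90 := hb
  have hv : (c.toNat + 32).isValidChar := by left; omega
  have hval : (Char.ofNat (c.toNat + 32)).toNat = c.toNat + 32 := toNat_ofNat_valid _ hv
  obtain ⟨hc, hd⟩ := h2
  change _ ≤ (Char.ofNat (c.toNat + 32)).toNat at hc
  change (Char.ofNat (c.toNat + 32)).toNat ≤ 'Z'.toNat at hd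
  rw [hval] at hc hd
  have hZ : 'Z'.toNat = 90 := rfl
  omega

-- the subtract-loop of either port never changes the key list
theorem keys_fold_sub (f : String → Int) :
    ∀ (xs : List String) (d : PySem.Dict String Int),
      (xs.foldl (fun nh j => if nh.contains j then nh.insert j (nh.getD j 0 - f j) else nh) d).keys
        = d.keys := by
  intro xs
  induction xs with
  | nil => intro d; rfl
  | cons j xs ih =>
    intro d
    simp only [List.foldl_cons]
    by_cases hc : d.contains j
    · rw [if_pos hc, ih, PySem.Dict.keys_insert_of_contains _ _ hc]
    · rw [if_neg hc, ih]

-- value after the subtract-loop: f k is subtracted once per occurrence of k in xs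
theorem getD_fold_sub (f : String → Int) :
    ∀ (xs : List String) (d : PySem.Dict String Int) (k : String),
      (xs.foldl (fun nh j => if nh.contains j then nh.insert j (nh.getD j 0 - f j) else nh) d).getD k 0
        = if d.contains k then d.getD k 0 - (xs.count k : Int) * f k else d.getD k 0 := by
  intro xs
  induction xs with
  | nil => intro d k; simp
  | cons j xs ih =>
    intro d k
    simp only [List.foldl_cons]
    by_cases hcj : d.contains j
    · rw [if_pos hcj, ih]
      by_cases hkj : k = j
      · subst hkj
        have hck : (d.insert k (d.getD k 0 - f k)).contains k = true :=
          PySem.Dict.contains_insert_self _ _ _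
        rw [if_pos hck, if_pos hcj, PySem.Dict.getD_insert_self]
        have hcnt : ((k :: xs).count k : Int) = (xs.count k : Int) + 1 := by
          rw [List.count_cons_self]; push_cast; ring
        rw [hcnt]; ring
      · have hck : (d.insert j (d.getD j 0 - f j)).contains k = d.contains k := by
          rw [PySem.Dict.contains_insert]
          simp [hkj]
        rw [hck, PySem.Dict.getD_insert_of_ne _ _ _ hkj,
            List.count_cons_of_ne (Ne.symm hkj)]
    · rw [if_neg hcj, ih]
      by_cases hkj : k = j
      · subst hkj
        simp [hcj]
      · rw [List.count_cons_of_ne (Ne.symm hkj)]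

theorem count_nodup (S : List String) (hS : S.Nodup) (k : String) :
    S.count k = if k ∈ S then 1 else 0 := by
  by_cases h : k ∈ S
  · rw [if_pos h]
    have h1 : S.count k ≤ 1 := List.nodup_iff_count_le_one.mp hS k
    have h2 : 1 ≤ S.count k := List.one_le_count_iff.mpr h
    omega
  · rw [if_neg h, List.count_eq_zero]
    exact h

-- core equivalence, on dicts: A's distinct-keys loop over counter Ls equals B's per-occurrence loop over Ls,
-- provided every element of Ls is already lowercase and the starting dict has distinct keys
theorem fold_counter_eq_fold_ones (Ls : List String) (d : PySem.Dict String Int)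
    (hd : d.keys.Nodup) (hl : ∀ k ∈ Ls, PySem.Str.lower k = k) :
    ((PySem.Dict.counter Ls).keys.foldl
        (fun nh j =>
          if nh.contains j then
            nh.insert j (nh.getD j 0 - (PySem.Dict.counter Ls).getD (PySem.Str.lower j) 0)
          else nh) d).items
      = (Ls.foldl (fun nh s => if nh.contains s then nh.insert s (nh.getD s 0 - 1) else nh) d).items := by
  have hSnd : (PySem.Dict.counter Ls).keys.Nodup := PySem.Dict.nodup_keys_counter Ls
  have hmemS : ∀ k, k ∈ (PySem.Dict.counter Ls).keys ↔ k ∈ Ls := by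
    intro k
    rw [PySem.Dict.keys_counter]
    exact PySem.Set.mem_ofList Ls k
  have hkA := keys_fold_sub (fun j => (PySem.Dict.counter Ls).getD (PySem.Str.lower j) 0)
      (PySem.Dict.counter Ls).keys d
  have hkB := keys_fold_sub (fun _ => 1) Ls d
  have hkB' : (Ls.foldl (fun nh s => if nh.contains s then nh.insert s (nh.getD s 0 - 1) else nh) d).keys = d.keys := hkB
  have hndA : ((PySem.Dict.counter Ls).keys.foldl
      (fun nh j =>
        if nh.contains j then
          nh.insert j (nh.getD j 0 - (PySem.Dict.counter Ls).getD (PySem.Str.lower j) 0)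
        else nh) d).keys.Nodup := by rw [hkA]; exact hd
  have hndB : (Ls.foldl (fun nh s => if nh.contains s then nh.insert s (nh.getD s 0 - 1) else nh) d).keys.Nodup := by
    rw [hkB']; exact hd
  rw [PySem.Dict.items_eq_map_keys _ hndA 0, PySem.Dict.items_eq_map_keys _ hndB 0, hkA, hkB']
  apply List.map_congr_left
  intro k _
  rw [getD_fold_sub (fun j => (PySem.Dict.counter Ls).getD (PySem.Str.lower j) 0)
      (PySem.Dict.counter Ls).keys d k,
      getD_fold_sub (fun _ => 1) Ls d k]
  congr 1
  by_cases hcd : d.contains k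
  · rw [if_pos hcd, if_pos hcd]
    congr 1
    rw [count_nodup _ hSnd k]
    by_cases hm : k ∈ (PySem.Dict.counter Ls).keys
    · have hmL : k ∈ Ls := (hmemS k).mp hm
      rw [if_pos hm, hl k hmL, PySem.Dict.getD_counter]
      push_cast; ring
    · have hmL : k ∉ Ls := fun h => hm ((hmemS k).mpr h)
      rw [if_neg hm, List.count_eq_zero.mpr hmL]
      push_cast; ring
  · rw [if_neg hcd, if_neg hcd]

theorem lower_singleton_lower (c : Char) :
    PySem.Str.lower (String.ofList [PySem.Chars.lowerChar c])
      = String.ofList [PySem.Chars.lowerChar c] := by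
  simp [PySem.Str.lower, PySem.Chars.lower, lowerChar_idem]

-- every element of the lowered word (as singleton strings) is fixed by lower
theorem lower_fix_of_mem (word : String) (k : String)
    (hk : k ∈ (PySem.Str.lower word).toList.map (fun c => String.ofList [c])) :
    PySem.Str.lower k = k := by
  obtain ⟨c, hc, hck⟩ := List.mem_map.mp hk
  have hc' : c ∈ PySem.Chars.lower word.toList := by
    simpa [PySem.Str.toList_lower] using hc
  obtain ⟨c', _, hc''⟩ := List.mem_map.mp (by simpa [PySem.Chars.lower] using hc')
  subst hck
  rw [← hc'']
  exact lower_singleton_lower c'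

-- ===== VERDICT (by name: the statement is the Claim_ definition above) =====
theorem update_hand_spec : Claim_equal_update_hand := by
  intro hand word _
  unfold Spec_update_hand update_hand update_hand_alt get_frequency_dict
  simp only []
  rw [PySem.Dict.foldl_insert_getD_add_one_eq_counter]
  have hB : (PySem.Str.lower word).toList.foldl
        (fun nh c =>
          if nh.contains (String.ofList [c]) then
            nh.insert (String.ofList [c]) (nh.getD (String.ofList [c]) 0 - 1)
          else nh)
        (PySem.Dict.ofList hand)
      = ((PySem.Str.lower word).toList.map (fun c => String.ofList [c])).foldl
          (fun nh s => if nh.contains s then nh.insert s (nh.getD s 0 - 1) else nh)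
          (PySem.Dict.ofList hand) := by rw [List.foldl_map]
  rw [hB]
  exact fold_counter_eq_fold_ones _ _ (PySem.Dict.nodup_keys_ofList hand)
      (lower_fix_of_mem word)
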